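-- pv_equiv track=rewrite | github.com/quanticsoul4772/adaptive_mcp_server | reasoning/inductive.py | _combine_generalizations
-- ===== SOURCE A (Python) =====
-- from typing import Dict, Any, List, Optional, Tuple
--
-- def _combine_generalizations(generalizations: List[str]) -> str:
--     """Combine generalizations into final answer"""
--     if not generalizations:
--         return "No clear patterns identified"
--
--     # Group by type
--     temporal = []
--     causal = []
--     structural = []
--     frequency = []
--
--     for gen in generalizations:
--         if gen.startswith("Based on temporal"):
--             temporal.append(gen)
--         elif gen.startswith("Based on causal"):
--             causal.append(gen)
--         elif gen.startswith("Based on structural"):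
--             structural.append(gen)
--         elif gen.startswith("Based on frequency"):
--             frequency.append(gen)
--
--     # Combine in logical order
--     combined = []
--     if structural:
--         combined.append(structural[0])  # Start with structure
--     if causal:
--         combined.append(causal[0])      # Then causation
--     if temporal:
--         combined.append(temporal[0])     # Then temporal sequence
--     if frequency:
--         combined.append(frequency[0])    # Finally frequency patterns
--
--     return " Furthermore, ".join(combined)
-- ===== SOURCE B (Python) =====
-- def _combine_generalizations(generalizations):
--     """Combine generalizations into final answer"""
--     if not generalizations:
--         return "No clear patterns identified"
--
--     # For each category prefix in the output order, keep only the first match.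
--     prefixes = (
--         "Based on structural",
--         "Based on causal",
--         "Based on temporal",
--         "Based on frequency",
--     )
--     combined = []
--     for prefix in prefixes:
--         first = next((g for g in generalizations if g.startswith(prefix)), None)
--         if first is not None:
--             combined.append(first)
--     return " Furthermore, ".join(combined)
-- ===== Notes on version B (the rewrite author's own statement) =====
-- stated objective: simpler
-- what changed: Replaces the four-bucket grouping pass plus per-bucket list builds with a direct scan per category that keeps only the first matching generalization (next(...) over an ordered tuple of prefixes), so no intermediate lists of all matches are built.
import Mathlib
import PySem

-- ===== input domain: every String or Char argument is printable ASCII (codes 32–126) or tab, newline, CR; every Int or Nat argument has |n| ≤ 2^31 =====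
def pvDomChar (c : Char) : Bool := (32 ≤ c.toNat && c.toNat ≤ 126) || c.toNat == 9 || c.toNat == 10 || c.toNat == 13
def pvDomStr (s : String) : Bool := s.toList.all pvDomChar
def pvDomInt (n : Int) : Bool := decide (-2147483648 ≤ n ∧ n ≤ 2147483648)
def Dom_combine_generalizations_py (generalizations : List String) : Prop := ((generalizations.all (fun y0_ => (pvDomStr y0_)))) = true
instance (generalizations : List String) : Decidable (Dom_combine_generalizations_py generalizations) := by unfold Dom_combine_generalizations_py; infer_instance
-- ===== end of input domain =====

-- B replaces A's four-bucket grouping pass with one first-match scan per category prefix (simpler, same output).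

-- ===== PORT A =====
def combine_generalizations_py (generalizations : List String) : String :=
  if generalizations = [] then "No clear patterns identified" else
  let st := generalizations.foldl (fun st gen =>
      if PySem.Str.startswith gen "Based on temporal" then (st.1 ++ [gen], st.2.1, st.2.2.1, st.2.2.2)
      else if PySem.Str.startswith gen "Based on causal" then (st.1, st.2.1 ++ [gen], st.2.2.1, st.2.2.2)
      else if PySem.Str.startswith gen "Based on structural" then (st.1, st.2.1, st.2.2.1 ++ [gen], st.2.2.2)
      else if PySem.Str.startswith gen "Based on frequency" then (st.1, st.2.1, st.2.2.1, st.2.2.2 ++ [gen])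
      else st)
    (([], [], [], []) : List String × List String × List String × List String)
  let combined : List String := []
  let combined := if st.2.2.1 ≠ [] then combined ++ [st.2.2.1.headI] else combined
  let combined := if st.2.1 ≠ [] then combined ++ [st.2.1.headI] else combined
  let combined := if st.1 ≠ [] then combined ++ [st.1.headI] else combined
  let combined := if st.2.2.2 ≠ [] then combined ++ [st.2.2.2.headI] else combined
  PySem.Str.join " Furthermore, " combined

-- ===== PORT B =====
def combine_generalizations_py_alt (generalizations : List String) : String :=
  if generalizations = [] then "No clear patterns identified" else
  let prefixes := ["Based on structural", "Based on causal", "Based on temporal", "Based on frequency"]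
  let combined := prefixes.foldl (fun acc pre =>
      match generalizations.find? (fun g => PySem.Str.startswith g pre) with
      | some g => acc ++ [g]
      | none => acc) []
  PySem.Str.join " Furthermore, " combined

-- ===== PRECONDITION & SPEC =====
def Spec_combine_generalizations_py (generalizations : List String) (out : String) : Prop := out = combine_generalizations_py_alt generalizations
instance (generalizations : List String) (out : String) : Decidable (Spec_combine_generalizations_py generalizations out) := by unfold Spec_combine_generalizations_py; infer_instance

-- ===== CLAIM (what is proved, stated in full; the proofs are below) =====
def Claim_equal_combine_generalizations_py : Prop := ∀ (generalizations : List String), Dom_combine_generalizations_py generalizations → Spec_combine_generalizations_py generalizations (combine_generalizations_py generalizations)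

-- ===== LEMMAS AND PROOFS =====

-- two startswith-tests with incomparable prefixes cannot both succeed
theorem sw_excl (p q g : String) (h1 : ¬ (p.toList <+: q.toList)) (h2 : ¬ (q.toList <+: p.toList))
    (hp : PySem.Str.startswith g p = true) : PySem.Str.startswith g q = false := by
  cases hq : PySem.Str.startswith g q
  · rfl
  · exfalso
    simp only [PySem.Str.startswith, PySem.Chars.startswith, List.isPrefixOf_iff_prefix] at hp hq
    rcases le_total p.toList.length q.toList.length with h | h
    · exact h1 (List.prefix_of_prefix_length_le hp hq h)
    · exact h2 (List.prefix_of_prefix_length_le hq hp h)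

-- invariant of A's grouping fold: the four accumulators are filters of the input
theorem stateA (l : List String) (t c s f : List String) :
    l.foldl (fun st gen =>
      if PySem.Str.startswith gen "Based on temporal" then (st.1 ++ [gen], st.2.1, st.2.2.1, st.2.2.2)
      else if PySem.Str.startswith gen "Based on causal" then (st.1, st.2.1 ++ [gen], st.2.2.1, st.2.2.2)
      else if PySem.Str.startswith gen "Based on structural" then (st.1, st.2.1, st.2.2.1 ++ [gen], st.2.2.2)
      else if PySem.Str.startswith gen "Based on frequency" then (st.1, st.2.1, st.2.2.1, st.2.2.2 ++ [gen])
      else st) (t, c, s, f)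
    = (t ++ l.filter (fun g => PySem.Str.startswith g "Based on temporal"),
       c ++ l.filter (fun g => PySem.Str.startswith g "Based on causal"),
       s ++ l.filter (fun g => PySem.Str.startswith g "Based on structural"),
       f ++ l.filter (fun g => PySem.Str.startswith g "Based on frequency")) := by
  induction l generalizing t c s f with
  | nil => simp
  | cons x xs ih =>
    simp only [List.foldl_cons, List.filter_cons]
    by_cases hT : PySem.Str.startswith x "Based on temporal"
    · have hC := sw_excl _ "Based on causal" x (by decide) (by decide) hT
      have hS := sw_excl _ "Based on structural" x (by decide) (by decide) hT
      have hF := sw_excl _ "Based on frequency" x (by decide) (by decide) hT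
      simp only [hT, hC, hS, hF, Bool.false_eq_true, eq_self_iff_true, if_true, if_false, ih]
      simp
    · by_cases hC : PySem.Str.startswith x "Based on causal"
      · have hS := sw_excl _ "Based on structural" x (by decide) (by decide) hC
        have hF := sw_excl _ "Based on frequency" x (by decide) (by decide) hC
        simp only [hT, hC, hS, hF, Bool.false_eq_true, eq_self_iff_true, if_true, if_false, ih]
        simp
      · by_cases hS : PySem.Str.startswith x "Based on structural"
        · have hF := sw_excl _ "Based on frequency" x (by decide) (by decide) hS
          simp only [hT, hC, hS, hF, Bool.false_eq_true, eq_self_iff_true, if_true, if_false, ih]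
          simp
        · by_cases hF : PySem.Str.startswith x "Based on frequency"
          · simp only [hT, hC, hS, hF, Bool.false_eq_true, eq_self_iff_true, if_true, if_false, ih]
            simp
          · simp only [hT, hC, hS, hF, Bool.false_eq_true, eq_self_iff_true, if_true, if_false, ih]

-- "append the head of the filtered list if nonempty" = "append the first match if any"
theorem append_first (l : List String) (p : String → Bool) (acc : List String) :
    (if l.filter p ≠ [] then acc ++ [(l.filter p).headI] else acc)
    = (match l.find? p with
       | some g => acc ++ [g]
       | none => acc) := by
  cases hf : l.find? p with
  | none =>
      have h : (l.filter p).head? = none := by rw [List.head?_filter, hf]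
      have : l.filter p = [] := List.head?_eq_none_iff.mp h
      simp [this]
  | some g =>
      have h : (l.filter p).head? = some g := by rw [List.head?_filter, hf]
      cases hl : l.filter p with
      | nil => rw [hl] at h; simp at h
      | cons a t =>
          rw [hl] at h
          simp only [List.head?_cons, Option.some.injEq] at h
          simp [h]

-- the acc = [] instance of append_first (the [] ++ · is already simplified away in the goal)
theorem append_first0 (l : List String) (p : String → Bool) :
    (if l.filter p ≠ [] then [(l.filter p).headI] else [])
    = (match l.find? p with
       | some g => [g]
       | none => []) := by
  have h := append_first l p []
  simpa using h

-- ===== VERDICT (by name: the statement is the Claim_ definition above) =====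
theorem combine_generalizations_py_spec : Claim_equal_combine_generalizations_py := by
  intro gens _
  unfold Spec_combine_generalizations_py combine_generalizations_py combine_generalizations_py_alt
  by_cases h : gens = []
  · simp [h]
  · simp only [if_neg h, stateA, List.nil_append, List.foldl_cons, List.foldl_nil]
    rw [append_first0, append_first, append_first, append_first]
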